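-- pv_equiv track=rewrite | github.com/FireChickenProductivity/TalonVoiceDictationSetup | correction_rules.py | compute_words_left_list
-- ===== SOURCE A (Python) =====
-- def compute_words_left_list(text: str):
--     result = []
--     last_character = ''
--     words_left = 1
--     text_without_trailing_spaces_to_the_right = text.rstrip()
--     for i in range(len(text_without_trailing_spaces_to_the_right) - 1, -1, -1):
--         character = text_without_trailing_spaces_to_the_right[i]
--         if character == ' ' and last_character != ' ':
--             words_left += 1
--         last_character = character
--         result.append(words_left)
--     result.reverse()
--     return result
-- ===== SOURCE B (Python) =====
-- def compute_words_left_list(text: str):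
--     stripped = text.rstrip()
--     n = len(stripped)
--     total = 1 + sum(1 for i in range(n - 1)
--                     if stripped[i] == ' ' and stripped[i + 1] != ' ')
--     result = []
--     current = total
--     for i in range(n):
--         result.append(current)
--         if i + 1 < n and stripped[i] == ' ' and stripped[i + 1] != ' ':
--             current -= 1
--     return result
-- ===== Notes on version B (the rewrite author's own statement) =====
-- stated objective: alternative
-- what changed: B replaces A's backward scan with a mutating word counter plus a final reverse by first computing the total word count from the boundary pairs and then emitting the list in a single forward pass that decrements at each word boundary.
import Mathlib
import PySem

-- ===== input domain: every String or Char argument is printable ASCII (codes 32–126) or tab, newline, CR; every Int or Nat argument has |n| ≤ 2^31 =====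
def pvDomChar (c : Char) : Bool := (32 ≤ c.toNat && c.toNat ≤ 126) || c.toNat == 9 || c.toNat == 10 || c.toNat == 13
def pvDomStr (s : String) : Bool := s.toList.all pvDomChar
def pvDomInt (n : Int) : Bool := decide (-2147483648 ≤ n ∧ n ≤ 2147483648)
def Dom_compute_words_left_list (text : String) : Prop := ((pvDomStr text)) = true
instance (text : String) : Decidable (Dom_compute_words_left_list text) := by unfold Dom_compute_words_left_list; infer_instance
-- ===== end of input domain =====

-- B replaces A's backward scan + reverse by a forward pass from a precomputed total word count (alternative decomposition, same cost).

-- ===== PORT A =====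
def compute_words_left_list (text : String) : List Int :=
  let s := (PySem.Str.rstrip text).toList
  let st := (PySem.List.pyRange ((s.length : Int) - 1) (-1) (-1)).foldl
    (fun (st : List Int × Option Char × Int) i =>
      let character := PySem.List.pyGetD s i ' '
      let w := if character = ' ' ∧ st.2.1 ≠ some ' ' then st.2.2 + 1 else st.2.2
      (st.1 ++ [w], some character, w))
    ([], none, 1)
  st.1.reverse

-- ===== PORT B =====
def compute_words_left_list_alt (text : String) : List Int :=
  let s := (PySem.Str.rstrip text).toList
  let n := s.length
  let total : Int := 1 + ((PySem.List.pyRange 0 ((n : Int) - 1) 1).map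
      (fun i => if PySem.List.pyGetD s i ' ' = ' ' ∧ PySem.List.pyGetD s (i + 1) ' ' ≠ ' ' then (1 : Int) else 0)).sum
  ((PySem.List.pyRange 0 (n : Int) 1).foldl
    (fun (st : List Int × Int) i =>
      let res := st.1 ++ [st.2]
      let cur := if i + 1 < (n : Int) ∧ PySem.List.pyGetD s i ' ' = ' ' ∧ PySem.List.pyGetD s (i + 1) ' ' ≠ ' '
                 then st.2 - 1 else st.2
      (res, cur))
    ([], total)).1

-- ===== PRECONDITION & SPEC =====
def Spec_compute_words_left_list (text : String) (out : List Int) : Prop := out = compute_words_left_list_alt text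
instance (text : String) (out : List Int) : Decidable (Spec_compute_words_left_list text out) := by unfold Spec_compute_words_left_list; infer_instance

-- ===== CLAIM (what is proved, stated in full; the proofs are below) =====
def Claim_equal_compute_words_left_list : Prop := ∀ (text : String), Dom_compute_words_left_list text → Spec_compute_words_left_list text (compute_words_left_list text)

-- ===== LEMMAS AND PROOFS =====

-- number of word boundaries (space followed by non-space) among adjacent pairs
def pvTrans : List Char → Int
  | [] => 0
  | [_] => 0
  | c :: d :: r => (if c = ' ' ∧ d ≠ ' ' then 1 else 0) + pvTrans (d :: r)

-- the common specification: entry i is 1 + boundaries in the suffix from i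
def pvSpecl : List Char → List Int
  | [] => []
  | c :: rest => (1 + pvTrans (c :: rest)) :: pvSpecl rest

-- entries w + boundaries of (suffix ++ [c])
def pvSpecE (l : List Char) (c : Char) (w : Int) : List Int :=
  match l with
  | [] => []
  | d :: rest => (w + pvTrans ((d :: rest) ++ [c])) :: pvSpecE rest c w

-- structural form of A's backward loop (input is the reversed string)
def pvRunA (r : List Char) (last : Option Char) (w : Int) : List Int :=
  match r with
  | [] => []
  | c :: rest =>
    let w' := if c = ' ' ∧ last ≠ some ' ' then w + 1 else w
    w' :: pvRunA rest (some c) w'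

-- structural form of B's forward loop
def pvRunB (l : List Char) (cur : Int) : List Int :=
  match l with
  | [] => []
  | [_] => [cur]
  | c :: d :: r => cur :: pvRunB (d :: r) (if c = ' ' ∧ d ≠ ' ' then cur - 1 else cur)

theorem pvTrans_append_pair (xs : List Char) (d c : Char) :
    pvTrans ((xs ++ [d]) ++ [c]) = pvTrans (xs ++ [d]) + (if d = ' ' ∧ c ≠ ' ' then 1 else 0) := by
  induction xs with
  | nil => simp [pvTrans]
  | cons x xs ih =>
    cases xs with
    | nil => simp [pvTrans]
    | cons y ys => simp only [List.cons_append, pvTrans] at *; omega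

theorem pvSpecE_append (l' : List Char) (d c : Char) (w : Int) :
    pvSpecE (l' ++ [d]) c w = pvSpecE l' d (w + (if d = ' ' ∧ c ≠ ' ' then 1 else 0)) ++ [w + (if d = ' ' ∧ c ≠ ' ' then 1 else 0)] := by
  induction l' with
  | nil => simp [pvSpecE, pvTrans]
  | cons x xs ih =>
    simp only [List.cons_append, pvSpecE, ih]
    refine congrArg₂ List.cons ?_ rfl
    have := pvTrans_append_pair (x :: xs) d c
    simp only [List.cons_append] at this ⊢
    omega

theorem pvRunA_specE (l : List Char) (c : Char) (w : Int) :
    pvRunA l.reverse (some c) w = (pvSpecE l c w).reverse := by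
  induction l using List.reverseRecOn generalizing c w with
  | nil => simp [pvRunA, pvSpecE]
  | append_singleton l' d ih =>
    rw [pvSpecE_append]
    simp only [List.reverse_append, List.reverse_cons, List.reverse_nil, List.nil_append,
      List.cons_append, List.nil_append, pvRunA]
    rw [ih]
    by_cases h : d = ' ' ∧ c ≠ ' '
    · simp [h]
    · simp [h]

theorem pvSpecl_append (l' : List Char) (d : Char) :
    pvSpecl (l' ++ [d]) = pvSpecE l' d 1 ++ [1] := by
  induction l' with
  | nil => simp [pvSpecl, pvSpecE, pvTrans]
  | cons x xs ih => simp only [List.cons_append, pvSpecl, pvSpecE, ih]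

theorem pvRunB_specl (l : List Char) : pvRunB l (1 + pvTrans l) = pvSpecl l := by
  induction l with
  | nil => rfl
  | cons c rest ih =>
    cases rest with
    | nil => simp [pvRunB, pvSpecl, pvTrans]
    | cons d r =>
      simp only [pvRunB, pvSpecl, pvTrans]
      refine congrArg₂ List.cons rfl ?_
      have hX : (if c = ' ' ∧ d ≠ ' ' then 1 + ((if c = ' ' ∧ d ≠ ' ' then (1 : Int) else 0) + pvTrans (d :: r)) - 1
          else 1 + ((if c = ' ' ∧ d ≠ ' ' then (1 : Int) else 0) + pvTrans (d :: r))) = 1 + pvTrans (d :: r) := by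
        by_cases h : c = ' ' ∧ d ≠ ' ' <;> simp [h]
      rw [hX]
      exact ih

-- A's backward scan + reverse equals the spec, given the last char is not ' '
theorem pvRunA_main (l : List Char) (h : l.getLast? ≠ some ' ') :
    (pvRunA l.reverse none 1).reverse = pvSpecl l := by
  induction l using List.reverseRecOn with
  | nil => rfl
  | append_singleton l' d _ =>
    have hd : d ≠ ' ' := by
      intro hd; apply h; rw [hd]; simp [List.getLast?_append]
    simp only [List.reverse_append, List.reverse_cons, List.reverse_nil, List.nil_append,
      List.cons_append, pvRunA]
    have hcond : ¬ (d = ' ' ∧ (none : Option Char) ≠ some ' ') := by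
      intro hc; exact hd hc.1
    rw [if_neg hcond, pvRunA_specE, pvSpecl_append]
    simp

-- A's fold accumulates pvRunA
theorem pvFoldA (s : List Char) (r : List Int) (last : Option Char) (w : Int) :
    (s.foldl (fun (st : List Int × Option Char × Int) character =>
        (st.1 ++ [if character = ' ' ∧ st.2.1 ≠ some ' ' then st.2.2 + 1 else st.2.2],
         some character,
         if character = ' ' ∧ st.2.1 ≠ some ' ' then st.2.2 + 1 else st.2.2)) (r, last, w)).1
      = r ++ pvRunA s last w := by
  induction s generalizing r last w with
  | nil => simp [pvRunA]
  | cons c rest ih => simp [pvRunA, ih]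

-- the descending index range maps to the reversed list
theorem pvMapNegRange (s : List Char) (d : Char) :
    (PySem.List.pyRange ((s.length : Int) - 1) (-1) (-1)).map (fun i => PySem.List.pyGetD s i d) = s.reverse := by
  have h1 : PySem.List.pyRange ((s.length : Int) - 1) (-1) (-1) = (PySem.List.pyRange 0 (s.length : Int) 1).reverse := by
    have := PySem.List.pyRange_neg_one_eq_reverse ((s.length : Int) - 1) (-1)
    simpa using this
  rw [h1, List.map_reverse, PySem.List.map_pyGetD_pyRange_zero']

-- B's forward fold over indices equals pvRunB on the suffix
theorem pvFoldB (s : List Char) (k : Nat) (hk : k ≤ s.length) (r : List Int) (cur : Int) :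
    ((PySem.List.pyRange (k : Int) (s.length : Int) 1).foldl
      (fun (st : List Int × Int) i =>
        (st.1 ++ [st.2],
         if i + 1 < (s.length : Int) ∧ PySem.List.pyGetD s i ' ' = ' ' ∧ PySem.List.pyGetD s (i + 1) ' ' ≠ ' '
         then st.2 - 1 else st.2)) (r, cur)).1 = r ++ pvRunB (s.drop k) cur := by
  induction hn : s.length - k generalizing k r cur with
  | zero =>
    have h1 : (s.length : Int) ≤ (k : Int) := by exact_mod_cast (by omega : s.length ≤ k)
    rw [PySem.List.pyRange_one_eq_nil h1]
    have h2 : s.drop k = [] := List.drop_eq_nil_iff.mpr (by omega)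
    simp [h2, pvRunB]
  | succ m ih =>
    have hk' : k < s.length := by omega
    rw [PySem.List.pyRange_one_cons (by exact_mod_cast hk'), List.foldl_cons]
    have hget : PySem.List.pyGetD s (k : Int) ' ' = s[k] := by
      rw [PySem.List.pyGetD_natCast]; simp [hk']
    have hcast : (k : Int) + 1 = ((k + 1 : Nat) : Int) := by push_cast; ring
    rw [hcast, hget]
    have hdrop : s.drop k = s[k] :: s.drop (k + 1) := List.drop_eq_getElem_cons hk'
    by_cases hlast : k + 1 < s.length
    · have hget1 : PySem.List.pyGetD s ((k + 1 : Nat) : Int) ' ' = s[k + 1] := by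
        rw [PySem.List.pyGetD_natCast]; simp [hlast]
      rw [hget1]
      have hlt : ((k + 1 : Nat) : Int) < (s.length : Int) := by exact_mod_cast hlast
      have hif : (if ((k + 1 : Nat) : Int) < (s.length : Int) ∧ s[k] = ' ' ∧ s[k + 1] ≠ ' '
            then cur - 1 else cur)
          = (if s[k] = ' ' ∧ s[k + 1] ≠ ' ' then cur - 1 else cur) := by
        by_cases hc : s[k] = ' ' ∧ s[k + 1] ≠ ' '
        · simp [hc]; omega
        · simp [hc]
      rw [hif, ih (k + 1) (by omega) _ _ (by omega)]
      have hdrop1 : s.drop (k + 1) = s[k + 1] :: s.drop (k + 2) := List.drop_eq_getElem_cons hlast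
      rw [hdrop, hdrop1]
      simp [pvRunB]
    · have hnlt : ¬ (((k + 1 : Nat) : Int) < (s.length : Int)) := by
        have : ¬ (k + 1 < s.length) := by omega
        exact_mod_cast this
      have hif : (if ((k + 1 : Nat) : Int) < (s.length : Int) ∧ s[k] = ' ' ∧ PySem.List.pyGetD s ((k + 1 : Nat) : Int) ' ' ≠ ' '
            then cur - 1 else cur) = cur := if_neg (fun hc => hnlt hc.1)
      rw [hif, ih (k + 1) (by omega) _ _ (by omega)]
      have hdrop1 : s.drop (k + 1) = [] := List.drop_eq_nil_iff.mpr (by omega)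
      rw [hdrop, hdrop1]
      simp [pvRunB]

-- the 0/1 sum over adjacent pairs is pvTrans
theorem pvSumTrans (s : List Char) (k : Nat) (hk : k ≤ s.length) :
    ((PySem.List.pyRange (k : Int) ((s.length : Int) - 1) 1).map
      (fun i => if PySem.List.pyGetD s i ' ' = ' ' ∧ PySem.List.pyGetD s (i + 1) ' ' ≠ ' ' then (1 : Int) else 0)).sum
    = pvTrans (s.drop k) := by
  induction hn : s.length - k generalizing k with
  | zero =>
    rw [PySem.List.pyRange_one_eq_nil (by omega)]
    have h2 : s.drop k = [] := List.drop_eq_nil_iff.mpr (by omega)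
    simp [h2, pvTrans]
  | succ m ih =>
    have hk' : k < s.length := by omega
    have hdrop : s.drop k = s[k] :: s.drop (k + 1) := List.drop_eq_getElem_cons hk'
    by_cases hlast : k + 1 < s.length
    · rw [PySem.List.pyRange_one_cons (by omega), List.map_cons, List.sum_cons]
      have hget : PySem.List.pyGetD s (k : Int) ' ' = s[k] := by
        rw [PySem.List.pyGetD_natCast]; simp [hk']
      have hcast : (k : Int) + 1 = ((k + 1 : Nat) : Int) := by push_cast; ring
      have hget1 : PySem.List.pyGetD s ((k : Int) + 1) ' ' = s[k + 1] := by
        rw [hcast, PySem.List.pyGetD_natCast]; simp [hlast]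
      rw [hget, hget1, hcast, ih (k + 1) (by omega) (by omega)]
      have hdrop1 : s.drop (k + 1) = s[k + 1] :: s.drop (k + 2) := List.drop_eq_getElem_cons hlast
      rw [hdrop, hdrop1]
      simp [pvTrans]
    · rw [PySem.List.pyRange_one_eq_nil (by omega)]
      have hdrop1 : s.drop (k + 1) = [] := List.drop_eq_nil_iff.mpr (by omega)
      rw [hdrop, hdrop1]
      simp [pvTrans]

-- rstrip strips trailing whitespace, so the last remaining char is never ' '
theorem pvGetLast_rstrip (t : List Char) : (PySem.Chars.rstrip t).getLast? ≠ some ' ' := by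
  intro h
  simp only [PySem.Chars.rstrip, List.getLast?_reverse] at h
  have hne : List.dropWhile PySem.Chars.isspace t.reverse ≠ [] := by
    intro he; rw [he] at h; simp at h
  have hhead := List.head_dropWhile_not PySem.Chars.isspace hne
  rw [List.head?_eq_some_head hne] at h
  have : (List.dropWhile PySem.Chars.isspace t.reverse).head hne = ' ' := by
    injection h
  rw [this] at hhead
  exact absurd hhead (by decide)

-- ===== VERDICT (by name: the statement is the Claim_ definition above) =====
theorem compute_words_left_list_spec : Claim_equal_compute_words_left_list := by
  intro text _
  unfold Spec_compute_words_left_list compute_words_left_list compute_words_left_list_alt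
  simp only [PySem.Str.toList_rstrip]
  set s := PySem.Chars.rstrip text.toList with hs
  rw [← List.foldl_map
      (f := fun i => PySem.List.pyGetD s i ' ')
      (g := fun (st : List Int × Option Char × Int) character =>
        (st.1 ++ [if character = ' ' ∧ st.2.1 ≠ some ' ' then st.2.2 + 1 else st.2.2],
         some character,
         if character = ' ' ∧ st.2.1 ≠ some ' ' then st.2.2 + 1 else st.2.2))
      (l := PySem.List.pyRange ((s.length : Int) - 1) (-1) (-1))
      (init := ([], none, 1))]
  rw [pvMapNegRange s ' ', pvFoldA s.reverse [] none 1, List.nil_append]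
  have hB := pvFoldB s 0 (by omega) [] (1 + (((PySem.List.pyRange (0 : Int) ((s.length : Int) - 1) 1).map
      (fun i => if PySem.List.pyGetD s i ' ' = ' ' ∧ PySem.List.pyGetD s (i + 1) ' ' ≠ ' ' then (1 : Int) else 0)).sum))
  have hT := pvSumTrans s 0 (by omega)
  simp only [Nat.cast_zero, List.drop_zero] at hB hT
  rw [hB, List.nil_append, hT, pvRunB_specl, pvRunA_main s (pvGetLast_rstrip text.toList)]
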